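-- pv_equiv track=rewrite | github.com/jardelrodriguespinto/openanime | bot/notificador.py | _profile_titles_for_schedule
-- ===== SOURCE A (Python) =====
-- def _profile_titles_for_schedule(profile: dict, limit: int = 8) -> list[str]:
--     titles = []
--     for key in ("progresso", "quer_ver", "assistidos"):
--         items = profile.get(key, []) or []
--         for item in items:
--             titulo = (item.get("titulo") or "").strip()
--             if titulo and titulo not in titles:
--                 titles.append(titulo)
--             if len(titles) >= max(1, limit):
--                 return titles
--     return titles
-- ===== SOURCE B (Python) =====
-- def _profile_titles_for_schedule(profile: dict, limit: int = 8) -> list[str]: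
--     flat = [t for t in ((item.get("titulo") or "").strip()
--                         for key in ("progresso", "quer_ver", "assistidos")
--                         for item in (profile.get(key, []) or []))
--             if t]
--     return sorted(set(flat), key=flat.index)[:max(1, limit)]
-- ===== Notes on version B (the rewrite author's own statement) =====
-- stated objective: alternative
-- what changed: Instead of A's nested loops that append-while-checking-membership and return early at the cap, B collects all nonempty stripped titles into a flat list, builds a set of them, re-derives the first-occurrence order by sorting the set with key=flat.index, and truncates once with [:max(1,limit)].
import Mathlib
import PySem

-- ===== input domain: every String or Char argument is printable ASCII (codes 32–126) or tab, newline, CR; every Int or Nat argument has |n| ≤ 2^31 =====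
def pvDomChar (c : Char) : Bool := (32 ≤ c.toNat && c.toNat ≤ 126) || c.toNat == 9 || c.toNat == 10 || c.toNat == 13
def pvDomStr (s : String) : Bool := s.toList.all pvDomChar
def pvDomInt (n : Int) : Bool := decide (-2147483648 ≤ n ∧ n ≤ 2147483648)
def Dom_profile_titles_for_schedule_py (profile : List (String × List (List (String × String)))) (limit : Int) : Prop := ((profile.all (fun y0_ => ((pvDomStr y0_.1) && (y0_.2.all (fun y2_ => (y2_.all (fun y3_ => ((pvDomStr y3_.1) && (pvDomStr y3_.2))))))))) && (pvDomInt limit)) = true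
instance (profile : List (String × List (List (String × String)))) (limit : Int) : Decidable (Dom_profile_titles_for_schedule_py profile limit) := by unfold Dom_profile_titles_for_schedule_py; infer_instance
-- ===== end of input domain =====

-- B replaces A's nested capped dedup loop (append after a membership test, early return at the cap)
-- by: collect all nonempty stripped titles, take the SET of them, sort it by first-occurrence index
-- (flat.index, injective on the set's elements), and truncate once at the end.

-- ===== PORT A =====
-- titulo = (item.get("titulo") or "").strip()
def pvATitulo (item : List (String × String)) : String :=
  PySem.Str.strip (((PySem.Dict.mk item).get? "titulo").getD "")

-- inner 'for item in items' loop; Bool = whether the early 'return' fired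
def pvAItems (limit : Int) (titles : List String) :
    List (List (String × String)) → List String × Bool
  | [] => (titles, false)
  | item :: rest =>
    let titulo := pvATitulo item
    let titles' := if titulo ≠ "" ∧ titulo ∉ titles then titles ++ [titulo] else titles
    if (titles'.length : Int) ≥ max 1 limit then (titles', true)
    else pvAItems limit titles' rest

-- outer 'for key in (...)' loop; 'profile.get(key, []) or []' — 'or []' is the identity on lists
def pvAKeys (profile : List (String × List (List (String × String)))) (limit : Int)
    (titles : List String) : List String → List String
  | [] => titles
  | key :: ks =>
    match pvAItems limit titles ((PySem.Dict.mk profile).getD key []) with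
    | (ts, true) => ts
    | (ts, false) => pvAKeys profile limit ts ks

def profile_titles_for_schedule_py (profile : List (String × List (List (String × String)))) (limit : Int) : List String :=
  pvAKeys profile limit [] ["progresso", "quer_ver", "assistidos"]

-- ===== PORT B =====
-- flat = the list comprehension: every nonempty stripped titulo, section order preserved
def pvBFlat (profile : List (String × List (List (String × String)))) : List String :=
  ((["progresso", "quer_ver", "assistidos"].flatMap
      (fun key => (PySem.Dict.mk profile).getD key [])).map pvATitulo).filter (· ≠ "")

-- sorted(set(flat), key=flat.index)[:max(1, limit)]
-- flat.index always succeeds on elements of set(flat) (they are members), so '.getD 0' is never taken;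
-- the slice bound max(1,limit) is ≥ 1, so '[:n]' is 'take n.toNat'.
def profile_titles_for_schedule_py_alt (profile : List (String × List (List (String × String)))) (limit : Int) : List String :=
  (PySem.List.sorted (PySem.Set.ofList (pvBFlat profile))
      (fun t => (PySem.List.index? (pvBFlat profile) t).getD 0) false).take (max 1 limit).toNat

-- ===== PRECONDITION & SPEC =====
def Spec_profile_titles_for_schedule_py (profile : List (String × List (List (String × String)))) (limit : Int) (out : List String) : Prop := out = profile_titles_for_schedule_py_alt profile limit
instance (profile : List (String × List (List (String × String)))) (limit : Int) (out : List String) : Decidable (Spec_profile_titles_for_schedule_py profile limit out) := by unfold Spec_profile_titles_for_schedule_py; infer_instance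

-- ===== CLAIM (what is proved, stated in full; the proofs are below) =====
def Claim_equal_profile_titles_for_schedule_py : Prop := ∀ (profile : List (String × List (List (String × String)))) (limit : Int), Dom_profile_titles_for_schedule_py profile limit → Spec_profile_titles_for_schedule_py profile limit (profile_titles_for_schedule_py profile limit)

-- ===== LEMMAS AND PROOFS =====

-- A's two nested loops, flattened to one pass over the stripped titles
def pvGo (limit : Int) (titles : List String) : List String → List String
  | [] => titles
  | t :: ts =>
    let titles' := if t ≠ "" ∧ t ∉ titles then titles ++ [t] else titles
    if (titles'.length : Int) ≥ max 1 limit then titles'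
    else pvGo limit titles' ts

theorem pvAItems_go (limit : Int) (items : List (List (String × String))) :
    ∀ (titles : List String) (rest : List String),
      (match pvAItems limit titles items with
        | (ts, true) => ts
        | (ts, false) => pvGo limit ts rest) =
      pvGo limit titles (items.map pvATitulo ++ rest) := by
  induction items with
  | nil => intro titles rest; simp [pvAItems]
  | cons item its ih =>
    intro titles rest
    simp only [pvAItems, pvGo, List.map_cons, List.cons_append]
    by_cases h : ((if pvATitulo item ≠ "" ∧ pvATitulo item ∉ titles then
        titles ++ [pvATitulo item] else titles).length : Int) ≥ max 1 limit
    · simp [h]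
    · simp [h, ih]

theorem pvAKeys_go (profile : List (String × List (List (String × String)))) (limit : Int) :
    ∀ (keys : List String) (titles : List String),
      pvAKeys profile limit titles keys =
      pvGo limit titles ((keys.flatMap
        (fun key => (PySem.Dict.mk profile).getD key [])).map pvATitulo) := by
  intro keys
  induction keys with
  | nil => intro titles; simp [pvAKeys, pvGo]
  | cons key ks ih =>
    intro titles
    simp only [pvAKeys, List.flatMap_cons, List.map_append]
    rw [← pvAItems_go]
    cases pvAItems limit titles ((PySem.Dict.mk profile).getD key []) with
    | mk ts b => cases b <;> simp [ih]

-- pvGo = "Set.update then truncate once", as long as the cap is not yet reached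
theorem pvGo_take (limit : Int) (ts : List String) :
    ∀ titles : List String, (titles.length : Int) < max 1 limit →
      pvGo limit titles ts =
        (PySem.Set.update titles (ts.filter (· ≠ ""))).take (max 1 limit).toNat := by
  induction ts with
  | nil =>
    intro titles h
    have : titles.length ≤ (max 1 limit).toNat := by omega
    simp [pvGo, PySem.Set.update, List.take_of_length_le this]
  | cons t ts ih =>
    intro titles h
    simp only [pvGo]
    set titles' := if t ≠ "" ∧ t ∉ titles then titles ++ [t] else titles with hT
    have hfrom : PySem.Set.update titles ((t :: ts).filter (· ≠ "")) =
        PySem.Set.update titles' (ts.filter (· ≠ "")) := by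
      by_cases he : t = ""
      · simp [he, hT, List.filter]
      · by_cases hm : t ∈ titles
        · simp [List.filter, he, PySem.Set.update_cons, hT, hm]
        · simp [List.filter, he, PySem.Set.update_cons, hT, hm]
    by_cases hcap : (titles'.length : Int) ≥ max 1 limit
    · simp only [if_pos hcap]
      have hlen' : titles'.length = (max 1 limit).toNat := by
        have hle : titles'.length ≤ titles.length + 1 := by
          rw [hT]; split <;> simp
        omega
      obtain ⟨rest, hrest⟩ : ∃ rest, titles' ++ rest =
          PySem.Set.update titles' (ts.filter (· ≠ "")) :=
        ⟨_, (PySem.Set.update_eq_append_filter titles' _).symm⟩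
      rw [hfrom, ← hrest, ← hlen', List.take_left]
    · simp only [if_neg hcap]
      rw [ih titles' (by omega), hfrom]

-- first-occurrence indices strictly increase along set(l)
theorem pvOfList_idx_pairwise (l : List String) :
    (PySem.Set.ofList l).Pairwise
      (fun a b => (PySem.List.index? l a).getD 0 < (PySem.List.index? l b).getD 0) := by
  induction l with
  | nil => simp [PySem.Set.ofList_nil]
  | cons x xs ih =>
    rw [PySem.Set.ofList_cons]
    constructor
    · intro b hb
      obtain ⟨hbmem, hbne⟩ := (PySem.Set.mem_discard _ _ _).1 hb
      have hbxs : b ∈ xs := (PySem.Set.mem_ofList _ _).1 hbmem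
      obtain ⟨k, hk⟩ := Option.isSome_iff_exists.1 ((PySem.List.index?_isSome_iff xs b).2 hbxs)
      rw [PySem.List.index?_cons_self, PySem.List.index?_cons_of_ne xs (fun h : x = b => hbne h.symm), hk]
      simp
    · have := ih.filter (fun y => y ≠ x)
      have hdis : PySem.Set.discard (PySem.Set.ofList xs) x =
          (PySem.Set.ofList xs).filter (fun y => y ≠ x) := by
        simp [PySem.Set.discard]
        exact List.filter_congr (fun y _ => by rw [Bool.beq_eq_decide_eq y x])
      rw [hdis]
      refine List.Pairwise.imp_of_mem ?_ this
      intro a b ha hb hab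
      have hax : a ≠ x := by simpa using (List.of_mem_filter ha)
      have hbx : b ≠ x := by simpa using (List.of_mem_filter hb)
      have haxs : a ∈ xs := (PySem.Set.mem_ofList _ _).1 (List.mem_of_mem_filter ha)
      have hbxs : b ∈ xs := (PySem.Set.mem_ofList _ _).1 (List.mem_of_mem_filter hb)
      obtain ⟨ka, hka⟩ := Option.isSome_iff_exists.1 ((PySem.List.index?_isSome_iff xs a).2 haxs)
      obtain ⟨kb, hkb⟩ := Option.isSome_iff_exists.1 ((PySem.List.index?_isSome_iff xs b).2 hbxs)
      rw [PySem.List.index?_cons_of_ne xs (fun h : x = a => hax h.symm),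
          PySem.List.index?_cons_of_ne xs (fun h : x = b => hbx h.symm), hka, hkb]
      rw [hka, hkb] at hab
      simpa using Nat.add_lt_add_right hab 1

-- sorting set(flat) by flat.index reproduces set(flat)'s own (first-occurrence) order
theorem pvSorted_ofList_idx (l : List String) :
    PySem.List.sorted (PySem.Set.ofList l)
      (fun t => (PySem.List.index? l t).getD 0) false = PySem.Set.ofList l :=
  PySem.List.sorted_eq_self_of_pairwise _ _
    ((pvOfList_idx_pairwise l).imp (fun h => Nat.le_of_lt h))

-- ===== VERDICT (by name: the statement is the Claim_ definition above) =====
theorem profile_titles_for_schedule_py_spec : Claim_equal_profile_titles_for_schedule_py := by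
  intro profile limit _
  unfold Spec_profile_titles_for_schedule_py profile_titles_for_schedule_py
    profile_titles_for_schedule_py_alt
  rw [pvAKeys_go, pvSorted_ofList_idx]
  have h := pvGo_take limit
    ((["progresso", "quer_ver", "assistidos"].flatMap
        (fun key => (PySem.Dict.mk profile).getD key [])).map pvATitulo) [] (by simp only [List.length_nil, Int.natCast_zero]; omega)
  rw [h]
  simp [pvBFlat, PySem.Set.update, PySem.Set.ofList_eq_foldl]
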